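-- pv_equiv track=rewrite | github.com/Oniliya/Projects_python_common | Paradigm/Sem_2/hw5_sem2.py | find_sub_arr
-- ===== SOURCE A (Python) =====
-- def find_sub_arr(my_list: list, num: int) -> list:
--     result = list([])
--     for i in range(0, len(my_list)):
--         sum_list = 0
--         for j in range(i, len(my_list)):
--             sum_list = sum_list + my_list[j]
--
--             if (sum(my_list[i:j+1])<=num):
--                 result.append(my_list[i:j+1])
--     return result
-- ===== SOURCE B (Python) =====
-- def find_sub_arr(my_list: list, num: int) -> list:
--     prefix = [0]
--     for x in my_list:
--         prefix.append(prefix[-1] + x)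
--     n = len(my_list)
--     return [my_list[i:j] for i in range(n) for j in range(i + 1, n + 1)
--             if prefix[j] - prefix[i] <= num]
-- ===== Notes on version B (the rewrite author's own statement) =====
-- stated objective: faster
-- what changed: B first builds a prefix-sum table in one pass and then emits the answer as a single comprehension over (i,j) pairs whose range-sum test is the O(1) lookup prefix[j]-prefix[i], replacing A's stateful nested loops that recompute sum(my_list[i:j+1]) for every pair; intended as faster (O(n^2)+output vs O(n^3)), measured 71x at n=1024 where A timed out, unconfirmed beyond that.
import Mathlib
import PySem

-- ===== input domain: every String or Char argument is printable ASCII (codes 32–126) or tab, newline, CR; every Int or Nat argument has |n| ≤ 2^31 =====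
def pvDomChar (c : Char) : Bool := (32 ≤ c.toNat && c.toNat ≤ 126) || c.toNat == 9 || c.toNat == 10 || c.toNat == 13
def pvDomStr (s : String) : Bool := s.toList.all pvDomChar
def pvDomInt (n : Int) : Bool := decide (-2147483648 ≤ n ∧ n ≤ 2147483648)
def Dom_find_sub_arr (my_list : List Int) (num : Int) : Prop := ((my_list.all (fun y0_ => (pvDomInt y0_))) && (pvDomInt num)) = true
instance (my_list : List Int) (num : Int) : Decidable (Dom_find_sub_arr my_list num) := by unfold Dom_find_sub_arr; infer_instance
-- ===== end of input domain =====

-- B builds a prefix-sum table once and emits the result as one comprehension whose range-sum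
-- test is a prefix-difference lookup, replacing A's nested loops that recompute sum(my_list[i:j+1])
-- per pair (objective: faster; intended as faster, measured 71x at n=1024 where A timed out,
-- unconfirmed beyond that size).

-- ===== PORT A =====
-- indices j come from range(i, len), so my_list[j] never raises; pyGetD with default 0 is exact there
def find_sub_arr (my_list : List Int) (num : Int) : List (List Int) :=
  (PySem.List.pyRange 0 my_list.length 1).foldl (fun result i =>
    ((PySem.List.pyRange i my_list.length 1).foldl
      (fun (st : Int × List (List Int)) j =>
        let sum_list := st.1 + PySem.List.pyGetD my_list j 0
        (sum_list,
          if (PySem.List.slice my_list (some i) (some (j + 1))).sum ≤ num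
          then st.2 ++ [PySem.List.slice my_list (some i) (some (j + 1))]
          else st.2))
      (0, result)).2)
    []

-- ===== PORT B =====
-- prefix[-1] is Python's last-element index on the always-nonempty table: pyGetD … (-1) is exact
def find_sub_arr_alt (my_list : List Int) (num : Int) : List (List Int) :=
  let pfx := my_list.foldl (fun P x => P ++ [PySem.List.pyGetD P (-1) 0 + x]) [(0 : Int)]
  let n : Int := my_list.length
  (PySem.List.pyRange 0 n 1).flatMap (fun i =>
    ((PySem.List.pyRange (i + 1) (n + 1) 1).filter
        (fun j => PySem.List.pyGetD pfx j 0 - PySem.List.pyGetD pfx i 0 ≤ num)).map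
      (fun j => PySem.List.slice my_list (some i) (some j)))

-- ===== PRECONDITION & SPEC =====
def Spec_find_sub_arr (my_list : List Int) (num : Int) (out : List (List Int)) : Prop := out = find_sub_arr_alt my_list num
instance (my_list : List Int) (num : Int) (out : List (List Int)) : Decidable (Spec_find_sub_arr my_list num out) := by unfold Spec_find_sub_arr; infer_instance

-- ===== CLAIM (what is proved, stated in full; the proofs are below) =====
def Claim_equal_find_sub_arr : Prop := ∀ (my_list : List Int) (num : Int), Dom_find_sub_arr my_list num → Spec_find_sub_arr my_list num (find_sub_arr my_list num)

-- ===== LEMMAS AND PROOFS =====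

-- running sums of L starting from s
def pvScan : Int → List Int → List Int
  | _, [] => []
  | s, x :: L => (s + x) :: pvScan (s + x) L

def pvPrefix (L : List Int) : List Int := 0 :: pvScan 0 L

theorem pv_build : ∀ (L acc : List Int) (hne : acc ≠ []),
    L.foldl (fun P x => P ++ [PySem.List.pyGetD P (-1) 0 + x]) acc
      = acc ++ pvScan (acc.getLast hne) L := by
  intro L
  induction L with
  | nil => intro acc hne; simp [pvScan]
  | cons x L ih =>
    intro acc hne
    simp only [List.foldl_cons]
    rw [PySem.List.pyGetD_neg_one acc 0 hne,
        ih (acc ++ [acc.getLast hne + x]) (by simp)]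
    simp [pvScan]

theorem pv_prefix_alt (L : List Int) :
    L.foldl (fun P x => P ++ [PySem.List.pyGetD P (-1) 0 + x]) [(0 : Int)] = pvPrefix L := by
  have := pv_build L [0] (by simp)
  simpa [pvPrefix] using this

theorem pv_scan_getD : ∀ (L : List Int) (s : Int) (k : Nat), k < L.length →
    (pvScan s L).getD k 0 = s + (L.take (k + 1)).sum := by
  intro L
  induction L with
  | nil => intro s k h; simp at h
  | cons x L ih =>
    intro s k h
    cases k with
    | zero => simp [pvScan]
    | succ k =>
      simp only [pvScan, List.getD_cons_succ]
      rw [ih (s + x) k (by simpa using Nat.lt_of_succ_lt_succ h)]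
      simp [List.take_succ_cons]
      ring

theorem pv_prefix_getD (L : List Int) (j : Nat) (h : j ≤ L.length) :
    PySem.List.pyGetD (pvPrefix L) (j : Int) 0 = (L.take j).sum := by
  rw [PySem.List.pyGetD_natCast]
  cases j with
  | zero => simp [pvPrefix]
  | succ k =>
    simp only [pvPrefix, List.getD_cons_succ]
    rw [pv_scan_getD L 0 k (by omega)]
    simp

theorem pv_cond (L : List Int) (iN kN : Nat) (hik : iN ≤ kN) (hk : kN < L.length) :
    (PySem.List.slice L (some (iN : Int)) (some ((kN : Int) + 1))).sum
      = (L.take (kN + 1)).sum - (L.take iN).sum := by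
  have hcast : (kN : Int) + 1 = ((kN + 1 : Nat) : Int) := by push_cast; ring
  rw [hcast, PySem.List.slice_natCast]
  have hsplit : L.take (kN + 1) = L.take iN ++ (L.drop iN).take (kN + 1 - iN) := by
    have h : L.take (iN + (kN + 1 - iN)) = L.take iN ++ (L.drop iN).take (kN + 1 - iN) := by
      rw [List.take_add]
    rw [show iN + (kN + 1 - iN) = kN + 1 by omega] at h
    exact h
  rw [hsplit, List.sum_append]
  ring

-- inner loop of A, from index kN, equals B's filtered-map comprehension block for start i
theorem pv_inner (L : List Int) (num : Int) (iN : Nat) :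
    ∀ (m kN : Nat), iN ≤ kN → kN + m = L.length →
    ∀ (sA : Int) (acc : List (List Int)),
    ((PySem.List.pyRange (kN : Int) L.length 1).foldl
      (fun (st : Int × List (List Int)) j =>
        let sum_list := st.1 + PySem.List.pyGetD L j 0
        (sum_list,
          if (PySem.List.slice L (some (iN : Int)) (some (j + 1))).sum ≤ num
          then st.2 ++ [PySem.List.slice L (some (iN : Int)) (some (j + 1))]
          else st.2))
      (sA, acc)).2
    = acc ++ ((PySem.List.pyRange ((kN : Int) + 1) ((L.length : Int) + 1) 1).filter
        (fun j => PySem.List.pyGetD (pvPrefix L) j 0 - PySem.List.pyGetD (pvPrefix L) (iN : Int) 0 ≤ num)).map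
      (fun j => PySem.List.slice L (some (iN : Int)) (some j)) := by
  intro m
  induction m with
  | zero =>
    intro kN hik hlen sA acc
    rw [PySem.List.pyRange_one_eq_nil (by exact_mod_cast (by omega : L.length ≤ kN)),
        PySem.List.pyRange_one_eq_nil (by omega)]
    simp
  | succ m ih =>
    intro kN hik hlen sA acc
    have hK : kN < L.length := by omega
    have hk : (kN : Int) < (L.length : Int) := by exact_mod_cast hK
    rw [PySem.List.pyRange_one_cons hk,
        PySem.List.pyRange_one_cons (by push_cast; omega : (kN : Int) + 1 < (L.length : Int) + 1)]
    simp only [List.foldl_cons, List.filter_cons]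
    have hpj : PySem.List.pyGetD (pvPrefix L) ((kN : Int) + 1) 0 = (L.take (kN + 1)).sum := by
      rw [show (kN : Int) + 1 = ((kN + 1 : Nat) : Int) by push_cast; ring]
      exact pv_prefix_getD L (kN + 1) (by omega)
    have hpi : PySem.List.pyGetD (pvPrefix L) (iN : Int) 0 = (L.take iN).sum :=
      pv_prefix_getD L iN (by omega)
    have hcond : ((PySem.List.slice L (some (iN : Int)) (some ((kN : Int) + 1))).sum ≤ num)
        = (PySem.List.pyGetD (pvPrefix L) ((kN : Int) + 1) 0
            - PySem.List.pyGetD (pvPrefix L) (iN : Int) 0 ≤ num) := by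
      rw [hpj, hpi, pv_cond L iN kN hik hK]
    have hcast : (kN : Int) + 1 = ((kN + 1 : Nat) : Int) := by push_cast; ring
    by_cases hc : (PySem.List.slice L (some (iN : Int)) (some ((kN : Int) + 1))).sum ≤ num
    · have hc' : (PySem.List.pyGetD (pvPrefix L) ((kN : Int) + 1) 0
          - PySem.List.pyGetD (pvPrefix L) (iN : Int) 0 ≤ num) := by rw [← hcond]; exact hc
      simp only [if_pos hc, decide_eq_true hc', if_pos, List.map_cons]
      rw [hcast]
      rw [ih (kN + 1) (by omega) (by omega) _ _]
      push_cast
      simp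
    · have hc' : ¬ (PySem.List.pyGetD (pvPrefix L) ((kN : Int) + 1) 0
          - PySem.List.pyGetD (pvPrefix L) (iN : Int) 0 ≤ num) := by rw [← hcond]; exact hc
      simp only [if_neg hc, decide_eq_false hc', Bool.false_eq_true, if_false]
      rw [hcast]
      rw [ih (kN + 1) (by omega) (by omega) _ _]

-- ===== VERDICT (by name: the statement is the Claim_ definition above) =====
theorem find_sub_arr_spec : Claim_equal_find_sub_arr := by
  intro L num _
  unfold Spec_find_sub_arr find_sub_arr find_sub_arr_alt
  rw [pv_prefix_alt L]
  rw [show (PySem.List.pyRange 0 (L.length : Int) 1).foldl (fun result i =>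
      ((PySem.List.pyRange i L.length 1).foldl
        (fun (st : Int × List (List Int)) j =>
          let sum_list := st.1 + PySem.List.pyGetD L j 0
          (sum_list,
            if (PySem.List.slice L (some i) (some (j + 1))).sum ≤ num
            then st.2 ++ [PySem.List.slice L (some i) (some (j + 1))]
            else st.2))
        (0, result)).2) []
    = (PySem.List.pyRange 0 (L.length : Int) 1).foldl (fun result i =>
        result ++ ((PySem.List.pyRange (i + 1) ((L.length : Int) + 1) 1).filter
          (fun j => PySem.List.pyGetD (pvPrefix L) j 0 - PySem.List.pyGetD (pvPrefix L) i 0 ≤ num)).map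
          (fun j => PySem.List.slice L (some i) (some j))) []
    from ?_]
  · rw [PySem.List.foldl_append_eq_flatMap]
    simp
  · apply PySem.List.foldl_congr_mem
    intro acc i hi
    rw [PySem.List.mem_pyRange_one] at hi
    obtain ⟨h0, h1⟩ := hi
    rw [(Int.toNat_of_nonneg h0).symm]
    have h2 : i.toNat ≤ L.length := by omega
    have := pv_inner L num i.toNat (L.length - i.toNat) i.toNat le_rfl (by omega) 0 acc
    simpa using this
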